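-- pv_equiv track=rewrite | github.com/NishEatsWafflez/Verified-BrainFun | compiler.py | verify_valid_loop
-- ===== SOURCE A (Python) =====
-- def verify_valid_loop(command):
--     count = 0
--     for i in command:
--         if i == '[':
--             count += 1
--         elif i == ']':
--             count -= 1
--         if count < 0:
--             return False
--     return count == 0
-- ===== SOURCE B (Python) =====
-- def verify_valid_loop(command):
--     depths = []
--     d = 0
--     for ch in command:
--         d += (ch == '[') - (ch == ']')
--         depths.append(d)
--     return (not depths) or (min(depths) >= 0 and depths[-1] == 0)
-- ===== Notes on version B (the rewrite author's own statement) =====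
-- stated objective: alternative
-- what changed: Replaces the fused scan with early exit by a build-prefix-depths-then-check decomposition: compute the running bracket depth for every character, then return true iff the list is empty or min(depths) >= 0 and depths[-1] == 0.
import Mathlib
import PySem

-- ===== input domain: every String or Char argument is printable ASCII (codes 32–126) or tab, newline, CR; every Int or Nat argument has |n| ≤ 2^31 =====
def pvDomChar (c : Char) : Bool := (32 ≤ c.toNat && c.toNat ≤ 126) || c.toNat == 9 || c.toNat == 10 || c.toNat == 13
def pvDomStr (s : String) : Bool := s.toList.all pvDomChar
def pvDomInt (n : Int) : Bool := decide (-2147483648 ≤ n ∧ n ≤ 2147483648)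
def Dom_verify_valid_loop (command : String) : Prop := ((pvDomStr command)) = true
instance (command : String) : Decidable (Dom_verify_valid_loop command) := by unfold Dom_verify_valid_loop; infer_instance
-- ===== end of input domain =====

-- B replaces A's fused early-exit scan by a two-pass decomposition: build the list of
-- running bracket depths, then check min ≥ 0 and last = 0 (alternative, same cost).


-- ===== PORT A =====
-- A's loop: a fused scan with an early 'return False' as soon as count drops below 0.
def verifyLoopA : List Char → Int → Bool
  | [], count => count == 0
  | i :: rest, count =>
    let count := if i = '[' then count + 1 else if i = ']' then count - 1 else count
    if count < 0 then false else verifyLoopA rest count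

def verify_valid_loop (command : String) : Bool := verifyLoopA command.toList 0

-- ===== PORT B =====
-- first pass of Source B: the list of running depths, one entry per character
def depthsOf : List Char → Int → List Int
  | [], _ => []
  | ch :: rest, d =>
    let d' := d + ((if ch = '[' then 1 else 0) - (if ch = ']' then 1 else 0))
    d' :: depthsOf rest d'

-- second pass of Source B: '(not depths) or (min(depths) >= 0 and depths[-1] == 0)'
def verify_valid_loop_alt (command : String) : Bool :=
  match depthsOf command.toList 0 with
  | [] => true
  | x :: t => decide (0 ≤ t.foldl min x) && ((x :: t).getLast (by simp) == 0)

-- ===== PRECONDITION & SPEC =====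
def Spec_verify_valid_loop (command : String) (out : Bool) : Prop := out = verify_valid_loop_alt command
instance (command : String) (out : Bool) : Decidable (Spec_verify_valid_loop command out) := by unfold Spec_verify_valid_loop; infer_instance

-- ===== CLAIM (what is proved, stated in full; the proofs are below) =====
def Claim_equal_verify_valid_loop : Prop := ∀ (command : String), Dom_verify_valid_loop command → Spec_verify_valid_loop command (verify_valid_loop command)

-- ===== LEMMAS AND PROOFS =====

-- B's check generalized to a starting count c (the empty case returns 'count == 0')
def bcheck (c : Int) : List Int → Bool
  | [] => c == 0
  | x :: t => decide (0 ≤ t.foldl min x) && ((x :: t).getLast (by simp) == 0)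

theorem foldl_min_le_init (t : List Int) : ∀ x : Int, t.foldl min x ≤ x := by
  induction t with
  | nil => intro x; simp
  | cons a t ih =>
    intro x
    calc t.foldl min (min x a) ≤ min x a := ih (min x a)
      _ ≤ x := min_le_left _ _

theorem foldl_min_init (t : List Int) : ∀ a b : Int,
    t.foldl min (min a b) = min a (t.foldl min b) := by
  induction t with
  | nil => intro a b; simp
  | cons h t ih =>
    intro a b
    simp only [List.foldl_cons]
    rw [min_assoc, ih]

theorem main_lemma (xs : List Char) : ∀ c : Int, 0 ≤ c →
    verifyLoopA xs c = bcheck c (depthsOf xs c) := by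
  induction xs with
  | nil => intro c _; simp [verifyLoopA, depthsOf, bcheck]
  | cons ch rest ih =>
    intro c hc
    have harith : (if ch = '[' then c + 1 else if ch = ']' then c - 1 else c)
        = c + ((if ch = '[' then (1:Int) else 0) - (if ch = ']' then 1 else 0)) := by
      split_ifs with h1 h2 <;> try omega
      · exact absurd (h1 ▸ h2) (by decide)
    simp only [verifyLoopA, depthsOf]
    rw [harith]
    set c' := c + ((if ch = '[' then (1:Int) else 0) - (if ch = ']' then 1 else 0)) with hc'
    by_cases hneg : c' < 0
    · -- A returns false; B's min includes the head depth c' < 0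
      rw [if_pos hneg]
      cases hrest : depthsOf rest c' with
      | nil =>
        simp only [bcheck, List.foldl_nil]
        have : ¬ ((0:Int) ≤ c') := by omega
        simp [this]
      | cons y t =>
        simp only [bcheck, List.foldl_cons]
        have h1 : t.foldl min (min c' y) ≤ min c' y := foldl_min_le_init t _
        have h2 : min c' y ≤ c' := min_le_left _ _
        have : ¬ ((0:Int) ≤ t.foldl min (min c' y)) := by omega
        simp [this]
    · rw [if_neg hneg]
      have h0 : (0:Int) ≤ c' := by omega
      rw [ih c' h0]
      cases hrest : depthsOf rest c' with
      | nil =>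
        simp only [bcheck, List.foldl_nil]
        simp [h0]
      | cons y t =>
        simp only [bcheck]
        congr 1
        · -- min over (c' :: y :: t) vs min over (y :: t), given 0 ≤ c'
          have hiff : ((0:Int) ≤ (y :: t).foldl min c') ↔ (0 ≤ t.foldl min y) := by
            simp only [List.foldl_cons]
            rw [foldl_min_init]
            constructor
            · intro h; exact le_trans h (min_le_right _ _)
            · intro h; exact le_min h0 h
          exact decide_eq_decide.mpr hiff.symm
        -- the getLast components agree definitionally: getLast (c'::y::t) unfolds to getLast (y::t)

-- ===== VERDICT (by name: the statement is the Claim_ definition above) =====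
theorem verify_valid_loop_spec : Claim_equal_verify_valid_loop := by
  intro command _
  unfold Spec_verify_valid_loop verify_valid_loop verify_valid_loop_alt
  rw [main_lemma command.toList 0 le_rfl]
  cases h : depthsOf command.toList 0 with
  | nil => simp [bcheck]
  | cons x t => simp [bcheck]
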